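-- pv_equiv track=rewrite | github.com/abimarticio/practice-problems | basic/prob_10_sol_1.py | vowel_beginning
-- ===== SOURCE A (Python) =====
-- def vowel_beginning(word):
--     vowel_list = []
--     for index in range(len(word)):
--         for i in range(len(word)):
--             if word[index] in ('A', 'E', 'I', 'O', 'U'):
--                 new_word = word[index:i+1]
--                 if new_word != "":
--                     vowel_list.append(new_word)
--
--     vowel = {}
--     for index in range(len(vowel_list)):
--         count = vowel_list.count(vowel_list[index])
--         vowel[vowel_list[index]] = count
--
--     total = 0
--     for value in vowel:
--         total += vowel[value]
--     return total
-- ===== SOURCE B (Python) =====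
-- def vowel_beginning(word):
--     n = len(word)
--     return sum(n - i for i, ch in enumerate(word) if ch in 'AEIOU')
-- ===== Notes on version B (the rewrite author's own statement) =====
-- stated objective: faster
-- what changed: A builds a quadratic list of suffix slices from every vowel position, counts each slice with list.count, puts counts in a dict and sums them; B is a single linear pass summing len(word)-index at each uppercase-vowel position (the dict-sum of counts is exactly the list length, which is that sum).
import Mathlib
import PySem

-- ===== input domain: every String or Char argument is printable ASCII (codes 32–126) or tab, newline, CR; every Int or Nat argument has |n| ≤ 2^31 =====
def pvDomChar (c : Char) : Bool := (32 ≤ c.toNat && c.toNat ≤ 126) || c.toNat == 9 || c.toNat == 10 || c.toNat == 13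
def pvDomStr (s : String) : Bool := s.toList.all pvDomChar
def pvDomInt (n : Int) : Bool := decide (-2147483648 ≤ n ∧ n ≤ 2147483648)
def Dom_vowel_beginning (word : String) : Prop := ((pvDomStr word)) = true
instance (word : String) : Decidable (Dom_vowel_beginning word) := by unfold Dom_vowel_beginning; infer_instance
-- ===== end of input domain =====

-- B replaces A's quadratic slice list + count dict with one linear pass summing len(word)-index at each vowel position (asymptotically faster).


-- ===== PORT A =====
def vowel_beginning (word : String) : Int :=
  let cs := word.toList
  let n : Int := PySem.Str.len word
  -- for index in range(len(word)): for i in range(len(word)): …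
  let vowel_list : List (List Char) :=
    (PySem.List.pyRange 0 n).foldl (fun acc index =>
      (PySem.List.pyRange 0 n).foldl (fun acc i =>
        -- word[index]: index ∈ range(len(word)) is always in range, so the none (IndexError) arm is never taken
        (PySem.List.pyGet? cs index).elim acc (fun c =>
          if c = 'A' ∨ c = 'E' ∨ c = 'I' ∨ c = 'O' ∨ c = 'U' then
            let new_word := PySem.List.slice cs (some index) (some (i + 1))  -- word[index:i+1]
            if new_word ≠ [] then acc ++ [new_word] else acc
          else acc)) acc) []
  -- vowel = {}; for index in range(len(vowel_list)): vowel[vowel_list[index]] = vowel_list.count(vowel_list[index])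
  let vowel : PySem.Dict (List Char) Int :=
    vowel_list.foldl (fun d w => d.insert w ((PySem.List.count vowel_list w : Nat) : Int)) PySem.Dict.empty
  -- total = 0; for value in vowel: total += vowel[value]   (every key is present, so getD's default is never used)
  vowel.keys.foldl (fun total k => total + vowel.getD k 0) 0

-- ===== PORT B =====
def vowel_beginning_alt (word : String) : Int :=
  let cs := word.toList
  let n : Int := PySem.Str.len word
  -- sum(n - i for i, ch in enumerate(word) if ch in 'AEIOU')   (ch is a single char, so 'in' is membership)
  (PySem.List.enumerate cs).foldl
    (fun acc p => if p.2 ∈ (['A', 'E', 'I', 'O', 'U'] : List Char) then acc + (n - p.1) else acc) 0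

-- ===== PRECONDITION & SPEC =====
def Spec_vowel_beginning (word : String) (out : Int) : Prop := out = vowel_beginning_alt word
instance (word : String) (out : Int) : Decidable (Spec_vowel_beginning word out) := by unfold Spec_vowel_beginning; infer_instance

-- ===== CLAIM (what is proved, stated in full; the proofs are below) =====
def Claim_equal_vowel_beginning : Prop := ∀ (word : String), Dom_vowel_beginning word → Spec_vowel_beginning word (vowel_beginning word)

-- ===== LEMMAS AND PROOFS =====

-- the vowel test as a Bool, shared by the proof-side reference sum
def pvVowelB (c : Char) : Bool := decide (c ∈ (['A', 'E', 'I', 'O', 'U'] : List Char))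

-- reference: the sum B computes, position-indexed from k
def pvVsum (cs : List Char) (n k : Int) : Int :=
  match cs with
  | [] => 0
  | c :: t => (if pvVowelB c then n - k else 0) + pvVsum t n (k + 1)

-- B's enumerate fold is the reference sum
theorem pv_b_eval (cs : List Char) (n : Int) : ∀ (k acc : Int),
    (PySem.List.enumerate cs k).foldl
      (fun acc p => if p.2 ∈ (['A', 'E', 'I', 'O', 'U'] : List Char) then acc + (n - p.1) else acc) acc
    = acc + pvVsum cs n k := by
  induction cs with
  | nil => intro k acc; simp [PySem.List.enumerate, pvVsum]
  | cons c t ih =>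
    intro k acc
    have he : PySem.List.enumerate (c :: t) k = (k, c) :: PySem.List.enumerate t (k + 1) := rfl
    rw [he, List.foldl_cons]
    show (PySem.List.enumerate t (k + 1)).foldl _ (if c ∈ (['A', 'E', 'I', 'O', 'U'] : List Char) then acc + (n - k) else acc) = _
    rw [ih]
    simp only [pvVsum, pvVowelB]
    by_cases h : c ∈ (['A', 'E', 'I', 'O', 'U'] : List Char) <;> simp only [h, if_pos, if_neg, decide_true, decide_false, Bool.false_eq_true, not_false_iff] <;> ring

-- reference sum as an indexed sum over range
theorem pv_vsum_eq (cs : List Char) : ∀ (n k : Int),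
    pvVsum cs n k
      = ((List.range cs.length).map (fun j => if pvVowelB (cs.getD j ' ') then n - (k + j) else 0)).sum := by
  induction cs with
  | nil => intro n k; simp [pvVsum]
  | cons c t ih =>
    intro n k
    simp only [pvVsum, List.length_cons, List.range_succ_eq_map, List.map_cons, List.map_map,
      List.sum_cons, List.getD_cons_zero, Nat.cast_zero]
    rw [ih n (k + 1)]
    congr 1
    · simp
    · apply congrArg; apply List.map_congr_left; intro j hj
      simp [Function.comp, Nat.succ_eq_add_one]
      ring_nf

-- a dict built by inserting a key-determined value for every element of L: lookup
theorem pv_get_foldl_insert (f : List Char → Int) (k : List Char) :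
    ∀ (L : List (List Char)) (d : PySem.Dict (List Char) Int),
    (L.foldl (fun d w => d.insert w (f w)) d).get? k = if k ∈ L then some (f k) else d.get? k := by
  intro L
  induction L with
  | nil => intro d; simp
  | cons a t ih =>
    intro d
    simp only [List.foldl_cons, ih]
    by_cases ht : k ∈ t
    · simp [ht]
    · simp only [ht, if_false]
      rw [PySem.Dict.get?_insert]
      by_cases hk : k = a <;> simp [hk, ht]

-- the two BEq instances on List Char count alike
theorem pv_count_inst (k : List Char) (L : List (List Char)) :
    @List.count _ List.instBEq k L = @List.count _ instBEqOfDecidableEq k L := by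
  induction L with
  | nil => rfl
  | cons a t ih =>
    rw [@List.count_cons _ List.instBEq, @List.count_cons _ instBEqOfDecidableEq, ih]
    by_cases h : a = k
    · subst h; simp
    · have h1 : (@BEq.beq _ List.instBEq a k) = false := by simp [h]
      have h2 : (@BEq.beq _ instBEqOfDecidableEq a k) = false := by simp [h]
      rw [h1, h2]

-- summing the count of each distinct element gives the length (cast of Mathlib's dedup lemma)
theorem pv_sum_counts (L : List (List Char)) :
    ((PySem.Set.ofList L).map (fun k => ((PySem.List.count L k : Nat) : Int))).sum = (L.length : Int) := by
  have hperm : (PySem.Set.ofList L).Perm L.dedup := by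
    rw [List.perm_ext_iff_of_nodup (PySem.Set.nodup_ofList L) L.nodup_dedup]
    intro a; rw [PySem.Set.mem_ofList, List.mem_dedup]
  have hmap : ∀ (k : List Char),
      ((PySem.List.count L k : Nat) : Int) = ((@List.count _ instBEqOfDecidableEq k L : Nat) : Int) := by
    intro k
    have h1 : PySem.List.count L k = @List.count _ List.instBEq k L := by simp [PySem.List.count]
    rw [h1, pv_count_inst]
  rw [show (L.length : Int) = (((L.dedup.map (fun k => @List.count _ instBEqOfDecidableEq k L)).sum : Nat) : Int) by
        rw [List.sum_map_count_dedup_eq_length]]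
  rw [Nat.cast_list_sum, List.map_map]
  refine List.Perm.sum_eq ?_
  refine List.Perm.trans (List.Perm.of_eq (List.map_congr_left (fun x _ => ?_))) (hperm.map _)
  exact hmap x

-- the whole counting-dict phase of A returns the length of vowel_list
theorem pv_dict_phase (L : List (List Char)) :
    (let d := L.foldl (fun d w => d.insert w ((PySem.List.count L w : Nat) : Int)) PySem.Dict.empty
     d.keys.foldl (fun total k => total + d.getD k 0) 0) = (L.length : Int) := by
  simp only []
  set d := L.foldl (fun d w => d.insert w ((PySem.List.count L w : Nat) : Int)) PySem.Dict.empty with hd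
  have hkeys : d.keys = PySem.Set.ofList L := by
    rw [hd, PySem.Dict.keys_foldl_insert L (fun _ w => ((PySem.List.count L w : Nat) : Int))]
    simp [PySem.Set.ofList_eq_foldl, PySem.Set.update]
  rw [PySem.List.foldl_add d.keys (fun k => d.getD k 0) 0, zero_add, hkeys]
  rw [← pv_sum_counts L]
  apply congrArg; apply List.map_congr_left
  intro k hk
  have hkL : k ∈ L := (PySem.Set.mem_ofList L k).mp hk
  rw [PySem.Dict.getD_eq_get?_getD, hd, pv_get_foldl_insert, if_pos hkL]
  rfl

-- how many i ∈ range(m) give a nonempty slice word[k:i+1]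
theorem pv_filter_len (m k : Nat) : ((List.range m).filter (fun j => decide (k ≤ j))).length = m - k := by
  induction m with
  | zero => simp
  | succ m ih =>
    rw [List.range_succ, List.filter_append]
    by_cases h : k ≤ m <;> simp [h, ih] <;> omega

-- nonemptiness of the slice word[k:j+1]
theorem pv_slice_ne (cs : List Char) (k j : Nat) (hk : k < cs.length) :
    (PySem.List.slice cs (some (k : Int)) (some ((j : Int) + 1)) ≠ []) ↔ k ≤ j := by
  have : ((j : Int) + 1) = ((j + 1 : Nat) : Int) := by push_cast; ring
  rw [this, PySem.List.slice_natCast]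
  constructor
  · intro h; by_contra hc; apply h
    have : j + 1 - k = 0 := by omega
    simp [this]
  · intro h hcontra
    have h1 : (List.take (j + 1 - k) (List.drop k cs)).length = 0 := by rw [hcontra]; rfl
    rw [List.length_take, List.length_drop] at h1
    omega

-- A's vowel_list has length Σ over vowel positions of (len - index)
theorem pv_list_len (cs : List Char) :
    ((PySem.List.pyRange 0 (cs.length : Int)).foldl (fun acc index =>
      (PySem.List.pyRange 0 (cs.length : Int)).foldl (fun acc i =>
        (PySem.List.pyGet? cs index).elim acc (fun c =>
          if c = 'A' ∨ c = 'E' ∨ c = 'I' ∨ c = 'O' ∨ c = 'U' then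
            if PySem.List.slice cs (some index) (some (i + 1)) ≠ [] then
              acc ++ [PySem.List.slice cs (some index) (some (i + 1))] else acc
          else acc)) acc) ([] : List (List Char))).length
    = ((List.range cs.length).map (fun k => if pvVowelB (cs.getD k ' ') then cs.length - k else 0)).sum := by
  rw [PySem.List.pyRange_zero_natCast cs.length, List.foldl_map]
  simp only [List.foldl_map]
  rw [PySem.List.foldl_congr_mem (g := fun (acc : List (List Char)) (k : Nat) =>
        acc ++ (if pvVowelB (cs.getD k ' ') then
          ((List.range cs.length).filter (fun j => decide (k ≤ j))).map
            (fun (j : Nat) => PySem.List.slice cs (some (k : Int)) (some ((j : Int) + 1)))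
        else []))]
  · rw [PySem.List.foldl_append_eq_flatMap, List.nil_append, List.length_flatMap]
    apply congrArg List.sum
    apply List.map_congr_left
    intro k hk
    have hk' : k < cs.length := List.mem_range.mp hk
    by_cases hv : pvVowelB (cs.getD k ' ')
    · simp only [hv, if_true, List.length_map, pv_filter_len]
    · simp only [hv, Bool.false_eq_true, if_false, List.length_nil]
  · intro acc k hk
    have hk' : k < cs.length := List.mem_range.mp hk
    have hget : PySem.List.pyGet? cs ((k : Nat) : Int) = some (cs.getD k ' ') := by
      rw [PySem.List.pyGet?_natCast, List.getD_eq_getElem cs ' ' hk', List.getElem?_eq_getElem hk']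
    simp only [hget, Option.elim_some]
    by_cases hc : cs.getD k ' ' = 'A' ∨ cs.getD k ' ' = 'E' ∨ cs.getD k ' ' = 'I' ∨
        cs.getD k ' ' = 'O' ∨ cs.getD k ' ' = 'U'
    · have hv : pvVowelB (cs.getD k ' ') = true := by simp [pvVowelB]; exact hc
      simp only [if_pos hc, hv, if_true]
      rw [PySem.List.foldl_append_ite
        (p := fun j : Nat => PySem.List.slice cs (some (k : Int)) (some ((j : Int) + 1)) ≠ [])
        (f := fun j : Nat => PySem.List.slice cs (some (k : Int)) (some ((j : Int) + 1)))]
      apply congrArg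
      apply congrArg
      apply List.filter_congr
      intro j _
      exact decide_eq_decide.mpr (pv_slice_ne cs k j hk')
    · have hv : pvVowelB (cs.getD k ' ') = false := by simp [pvVowelB]; tauto
      simp only [if_neg hc, hv, Bool.false_eq_true, if_false, List.append_nil]
      exact PySem.List.foldl_ignore _ _

-- ===== VERDICT (by name: the statement is the Claim_ definition above) =====
theorem vowel_beginning_spec : Claim_equal_vowel_beginning := by
  intro word _
  unfold Spec_vowel_beginning vowel_beginning vowel_beginning_alt
  simp only [PySem.Str.len_eq]
  rw [pv_b_eval word.toList (word.toList.length : Int) 0 0, zero_add, pv_vsum_eq]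
  rw [pv_dict_phase, pv_list_len]
  rw [Nat.cast_list_sum, List.map_map]
  apply congrArg List.sum
  apply List.map_congr_left
  intro k hk
  have hk' : k < word.toList.length := List.mem_range.mp hk
  by_cases hv : pvVowelB (word.toList.getD k ' ') <;> simp only [Function.comp, hv, if_true,
    Bool.false_eq_true, if_false, Nat.cast_zero, zero_add]
  push_cast [Nat.cast_sub (le_of_lt hk')]
  ring
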